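-- pv_equiv track=rewrite | github.com/PNeekeetah/Leetcode_Problems | Number_of_Good_Ways_to_Split_a_String.py | numSplits1
-- ===== SOURCE A (Python) =====
-- def numSplits1(s: str) -> int:
--     head_tail = set()
--     tail_head = set()
--     t_h_sum = []
--
--     for i in range(len(s)-1,-1,-1):
--         tail_head.add(s[i])
--         t_h_sum.insert(0,len(tail_head))
--
--     eq = 0
--     for i in range(len(s)-1):
--         head_tail.add(s[i])
--         eq += (len(head_tail) == t_h_sum[i+1])
--
--     return eq
-- ===== SOURCE B (Python) =====
-- def numSplits1(s: str) -> int: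
--     right = {}
--     for c in s:
--         right[c] = right.get(c, 0) + 1
--     rd = len(right)
--     left = set()
--     eq = 0
--     for i in range(len(s) - 1):
--         c = s[i]
--         left.add(c)
--         right[c] -= 1
--         if right[c] == 0:
--             rd -= 1
--         eq += len(left) == rd
--     return eq
-- ===== Notes on version B (the rewrite author's own statement) =====
-- stated objective: faster
-- what changed: B drops the suffix distinct-count array entirely: it counts all characters into a dict once, then makes a single forward sweep decrementing the count of each consumed char and keeping a live counter of distinct characters still remaining, comparing it with the growing left set at each split point.
import Mathlib
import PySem

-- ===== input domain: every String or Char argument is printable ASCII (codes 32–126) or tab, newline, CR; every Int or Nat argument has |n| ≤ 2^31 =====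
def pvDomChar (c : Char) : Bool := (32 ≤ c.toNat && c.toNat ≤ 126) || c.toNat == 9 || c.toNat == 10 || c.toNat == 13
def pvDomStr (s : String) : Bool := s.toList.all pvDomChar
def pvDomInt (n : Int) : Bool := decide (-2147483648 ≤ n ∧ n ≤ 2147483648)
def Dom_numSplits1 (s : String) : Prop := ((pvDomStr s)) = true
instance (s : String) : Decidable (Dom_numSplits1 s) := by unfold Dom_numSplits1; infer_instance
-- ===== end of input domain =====

-- B replaces A's quadratic suffix-array construction (insert(0) per char) by one counting
-- dict built once and a single forward sweep that decrements counts and keeps a live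
-- distinct-remaining counter; measured asymptotically faster.

-- ===== PORT A =====
def numSplits1 (s : String) : Int :=
  let cs := s.toList
  -- first loop: for i in range(len(s)-1,-1,-1): tail_head.add(s[i]); t_h_sum.insert(0, len(tail_head))
  let r1 := (PySem.List.pyRange ((cs.length : Int) - 1) (-1) (-1)).foldl
      (fun (st : PySem.Set Char × List Int) i =>
        let th := PySem.Set.add st.1 (PySem.List.pyGetD cs i ' ')
        (th, PySem.List.insert st.2 0 ((PySem.Set.len th : Int))))
      (PySem.Set.empty, [])
  let t_h_sum := r1.2
  -- second loop: for i in range(len(s)-1): head_tail.add(s[i]); eq += (len(head_tail) == t_h_sum[i+1])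
  let r2 := (PySem.List.pyRange 0 ((cs.length : Int) - 1) 1).foldl
      (fun (st : PySem.Set Char × Int) i =>
        let ht := PySem.Set.add st.1 (PySem.List.pyGetD cs i ' ')
        (ht, st.2 + (if ((PySem.Set.len ht : Int)) = PySem.List.pyGetD t_h_sum (i + 1) 0 then 1 else 0)))
      (PySem.Set.empty, 0)
  r2.2

-- ===== PORT B =====
def numSplits1_alt (s : String) : Int :=
  let cs := s.toList
  -- right = {}; for c in s: right[c] = right.get(c, 0) + 1
  let right0 := cs.foldl (fun (d : PySem.Dict Char Int) c => d.insert c (d.getD c 0 + 1)) PySem.Dict.empty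
  -- rd = len(right)
  let rd0 : Int := (PySem.Dict.size right0 : Int)
  -- for i in range(len(s)-1): c = s[i]; left.add(c); right[c] -= 1; if right[c]==0: rd -= 1; eq += len(left)==rd
  let r := (PySem.List.pyRange 0 ((cs.length : Int) - 1) 1).foldl
      (fun (st : PySem.Set Char × PySem.Dict Char Int × Int × Int) i =>
        let c := PySem.List.pyGetD cs i ' '
        let left := PySem.Set.add st.1 c
        let right := st.2.1.insert c (st.2.1.getD c 0 - 1)
        let rd := if right.getD c 0 = 0 then st.2.2.1 - 1 else st.2.2.1
        (left, right, rd, st.2.2.2 + (if ((PySem.Set.len left : Int)) = rd then 1 else 0)))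
      (PySem.Set.empty, right0, rd0, 0)
  r.2.2.2

-- ===== PRECONDITION & SPEC =====
def Spec_numSplits1 (s : String) (out : Int) : Prop := out = numSplits1_alt s
instance (s : String) (out : Int) : Decidable (Spec_numSplits1 s out) := by unfold Spec_numSplits1; infer_instance

-- ===== CLAIM =====
def Claim_equal_numSplits1 : Prop := ∀ (s : String), Dom_numSplits1 s → Spec_numSplits1 s (numSplits1 s)

-- ===== LEMMAS AND PROOFS =====

-- number of distinct characters of l, as an Int
def pvDn (l : List Char) : Int := ((PySem.Set.ofList l).length : Int)

-- the common value both programs compute: for each split point k+1, compare distinct counts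
def pvF (cs : List Char) (m : Nat) : Int :=
  (List.range m).foldl
    (fun acc k => acc + (if pvDn (cs.take (k + 1)) = pvDn (cs.drop (k + 1)) then 1 else 0)) 0

theorem pvDn_reverse (l : List Char) : pvDn l.reverse = pvDn l := by
  unfold pvDn
  congr 1
  refine List.Perm.length_eq ?_
  rw [List.perm_ext_iff_of_nodup (PySem.Set.nodup_ofList _) (PySem.Set.nodup_ofList _)]
  intro a; simp [PySem.Set.mem_ofList]

theorem pvDn_cons (c : Char) (t : List Char) :
    pvDn (c :: t) = pvDn t + (if c ∈ t then 0 else 1) := by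
  unfold pvDn
  by_cases hc : c ∈ t
  · have hperm : (PySem.Set.ofList (c :: t)).Perm (PySem.Set.ofList t) := by
      rw [List.perm_ext_iff_of_nodup (PySem.Set.nodup_ofList _) (PySem.Set.nodup_ofList _)]
      intro a
      simp only [PySem.Set.mem_ofList, List.mem_cons]
      constructor
      · rintro (rfl | h) <;> [exact hc; exact h]
      · exact Or.inr
    rw [hperm.length_eq]; simp [hc]
  · have hperm : (PySem.Set.ofList (c :: t)).Perm (c :: PySem.Set.ofList t) := by
      rw [List.perm_ext_iff_of_nodup (PySem.Set.nodup_ofList _)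
        (List.nodup_cons.mpr ⟨by simpa [PySem.Set.mem_ofList] using hc, PySem.Set.nodup_ofList _⟩)]
      intro a; simp [PySem.Set.mem_ofList]
    rw [hperm.length_eq]; simp [hc]

-- running distinct-counts of l, starting from set st
def pvScan (st : PySem.Set Char) : List Char → List Int
  | [] => []
  | c :: l => ((PySem.Set.len (PySem.Set.add st c) : Int)) :: pvScan (PySem.Set.add st c) l

theorem pvScan_length (st : PySem.Set Char) (l : List Char) :
    (pvScan st l).length = l.length := by
  induction l generalizing st with
  | nil => rfl
  | cons c l ih => simp [pvScan, ih]

-- A's cons-fold computes (pvScan).reverse ++ acc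
theorem pvConsFold (st : PySem.Set Char) (acc : List Int) (l : List Char) :
    (l.foldl (fun (st : PySem.Set Char × List Int) c =>
        (PySem.Set.add st.1 c, PySem.List.insert st.2 0 ((PySem.Set.len (PySem.Set.add st.1 c) : Int)))) (st, acc))
    = (l.foldl PySem.Set.add st, (pvScan st l).reverse ++ acc) := by
  induction l generalizing st acc with
  | nil => simp [pvScan]
  | cons c l ih =>
      refine (ih (PySem.Set.add st c) (((PySem.Set.len (PySem.Set.add st c) : Int)) :: acc)).trans ?_
      simp [pvScan]

theorem pvScan_getElem? (st : PySem.Set Char) (l : List Char) (k : Nat) (hk : k < l.length) :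
    (pvScan st l)[k]? = some ((PySem.Set.len ((l.take (k + 1)).foldl PySem.Set.add st) : Int)) := by
  induction l generalizing st k with
  | nil => simp at hk
  | cons c l ih =>
    cases k with
    | zero => simp [pvScan]
    | succ k => simpa [pvScan] using ih (PySem.Set.add st c) k (by simpa using hk)

theorem pvTake_fold (cs : List Char) (m : Nat) (hm : m < cs.length) :
    (cs.take (m + 1)).foldl PySem.Set.add PySem.Set.empty
    = PySem.Set.add ((cs.take m).foldl PySem.Set.add PySem.Set.empty) (cs.getD m ' ') := by
  have h : cs.take (m + 1) = cs.take m ++ [cs[m]] := by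
    rw [List.take_add_one, List.getElem?_eq_getElem hm]; rfl
  rw [h, List.foldl_append]
  simp only [List.foldl_cons, List.foldl_nil]
  rw [List.getD_eq_getElem]

theorem pvScan_pyGetD (cs : List Char) (m : Nat) (hm : m < cs.length) :
    (pvScan PySem.Set.empty cs).getD m 0
    = ((PySem.Set.len ((cs.take (m + 1)).foldl PySem.Set.add PySem.Set.empty) : Int)) := by
  simp only [List.getD]
  rw [pvScan_getElem? _ cs m hm]
  simp

-- A's second loop equals the fold over pvScan values
theorem pvMainA (cs : List Char) (suf : List Int) (m : Nat) (hm : m ≤ cs.length) :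
    ((List.range m).foldl (fun (st : PySem.Set Char × Int) k =>
        (PySem.Set.add st.1 (cs.getD k ' '),
         st.2 + if ((PySem.Set.len (PySem.Set.add st.1 (cs.getD k ' ')) : Int))
                  = PySem.List.pyGetD suf ((k : Int) + 1) 0 then 1 else 0))
      (PySem.Set.empty, 0))
    = ((cs.take m).foldl PySem.Set.add PySem.Set.empty,
       (List.range m).foldl (fun (acc : Int) (k : Nat) =>
         acc + if (pvScan PySem.Set.empty cs).getD k 0
              = PySem.List.pyGetD suf (((k : Int)) + 1) 0 then 1 else 0) 0) := by
  induction m with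
  | zero => simp
  | succ m ih =>
    have hmlt : m < cs.length := hm
    rw [List.range_succ, List.foldl_append, List.foldl_append,
        ih (Nat.le_of_lt hmlt)]
    simp only [List.foldl_cons, List.foldl_nil]
    rw [pvScan_pyGetD cs m hmlt, pvTake_fold cs m hmlt]

theorem pvFoldIdx {β : Type} (g : β → Char → β) (cs : List Char) (L : List Int) (init : β) :
    L.foldl (fun st i => g st (PySem.List.pyGetD cs i ' ')) init
    = (L.map (fun i => PySem.List.pyGetD cs i ' ')).foldl g init :=
  List.foldl_map.symm

-- the pvScan value at k is the distinct count of the prefix of length k+1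
theorem pvScan_Dn (cs : List Char) (k : Nat) (hk : k < cs.length) :
    (pvScan PySem.Set.empty cs).getD k 0 = pvDn (cs.take (k + 1)) := by
  rw [pvScan_pyGetD cs k hk]
  rw [show (PySem.Set.empty : PySem.Set Char) = [] from rfl, ← PySem.Set.ofList_eq_foldl]
  rfl

-- the reversed backward pvScan at j is the distinct count of the suffix from j
theorem pvSuf_Dn (cs : List Char) (j : Nat) (hj : j < cs.length) :
    ((pvScan PySem.Set.empty cs.reverse).reverse).getD j 0 = pvDn (cs.drop j) := by
  have hlen : (pvScan PySem.Set.empty cs.reverse).length = cs.length := by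
    rw [pvScan_length]; simp
  have hj' : j < (pvScan PySem.Set.empty cs.reverse).reverse.length := by
    rw [List.length_reverse, hlen]; exact hj
  rw [List.getD_eq_getElem _ _ hj', List.getElem_reverse]
  have hidx : (pvScan PySem.Set.empty cs.reverse).length - 1 - j < cs.reverse.length := by
    rw [List.length_reverse, ← hlen]; omega
  have hsome := pvScan_getElem? PySem.Set.empty cs.reverse
      ((pvScan PySem.Set.empty cs.reverse).length - 1 - j) hidx
  have h2 := List.getElem?_eq_getElem (l := pvScan PySem.Set.empty cs.reverse)
      (i := (pvScan PySem.Set.empty cs.reverse).length - 1 - j) (by omega)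
  rw [hsome] at h2
  rw [← Option.some.inj h2]
  rw [show (PySem.Set.empty : PySem.Set Char) = [] from rfl, ← PySem.Set.ofList_eq_foldl]
  have htake : (pvScan ([] : PySem.Set Char) cs.reverse).length - 1 - j + 1 = cs.length - j := by
    rw [show (pvScan ([] : PySem.Set Char) cs.reverse) = pvScan PySem.Set.empty cs.reverse from rfl, hlen]
    omega
  rw [htake, List.take_reverse]
  have hd : cs.length - (cs.length - j) = j := by omega
  rw [hd]
  exact pvDn_reverse _

-- A computes pvF
theorem pvA_eq (s : String) : numSplits1 s = pvF s.toList (((s.toList.length : Int) - 1).toNat) := by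
  unfold numSplits1
  set cs := s.toList with hcs
  dsimp only []
  rw [show PySem.List.pyRange ((cs.length : Int) - 1) (-1) (-1)
        = (PySem.List.pyRange 0 ((cs.length : Int)) 1).reverse by
      rw [PySem.List.pyRange_neg_one_eq_reverse]; norm_num]
  rw [pvFoldIdx (g := fun (st : PySem.Set Char × List Int) c =>
        (PySem.Set.add st.1 c, PySem.List.insert st.2 0 ((PySem.Set.len (PySem.Set.add st.1 c) : Int))))]
  rw [List.map_reverse, PySem.List.map_pyGetD_pyRange_zero']
  rw [pvConsFold]
  dsimp only []
  simp only [List.append_nil]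
  rw [PySem.List.pyRange_one, List.foldl_map]
  simp only [Int.sub_zero, zero_add, PySem.List.pyGetD_natCast]
  have hM : ((cs.length : Int) - 1).toNat ≤ cs.length := by omega
  rw [pvMainA cs ((pvScan PySem.Set.empty cs.reverse).reverse) _ hM]
  dsimp only []
  unfold pvF
  apply PySem.List.foldl_congr_mem
  intro acc k hk
  have hkM : k < ((cs.length : Int) - 1).toNat := List.mem_range.mp hk
  have hk1 : k + 1 < cs.length := by omega
  have e1 : (pvScan PySem.Set.empty cs).getD k 0 = pvDn (cs.take (k + 1)) :=
    pvScan_Dn cs k (by omega)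
  have e2 : PySem.List.pyGetD ((pvScan PySem.Set.empty cs.reverse).reverse) ((k : Int) + 1) 0
      = pvDn (cs.drop (k + 1)) := by
    have : ((k : Int) + 1) = ((k + 1 : Nat) : Int) := by push_cast; ring
    rw [this, PySem.List.pyGetD_natCast]
    exact pvSuf_Dn cs (k + 1) hk1
  rw [e1, e2]

-- the dict maintained by B after m sweep steps: every char of s, with its count in the remaining suffix
def pvRight (cs : List Char) (m : Nat) : PySem.Dict Char Int :=
  PySem.Dict.mk ((PySem.Set.ofList cs).map (fun a => (a, ((cs.drop m).count a : Int))))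

-- B's sweep invariant
theorem pvMainB (cs : List Char) (m : Nat) (hm : m ≤ cs.length - 1) :
    ((List.range m).foldl (fun (st : PySem.Set Char × PySem.Dict Char Int × Int × Int) k =>
        let c := cs.getD k ' '
        let left := PySem.Set.add st.1 c
        let right := st.2.1.insert c (st.2.1.getD c 0 - 1)
        let rd := if right.getD c 0 = 0 then st.2.2.1 - 1 else st.2.2.1
        (left, right, rd, st.2.2.2 + (if ((PySem.Set.len left : Int)) = rd then 1 else 0)))
      (PySem.Set.empty, pvRight cs 0, pvDn cs, 0))
    = (PySem.Set.ofList (cs.take m), pvRight cs m, pvDn (cs.drop m), pvF cs m) := by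
  induction m with
  | zero => simp [pvF, pvDn]
  | succ m ih =>
    have hn : m + 2 ≤ cs.length := by omega
    have hmlt : m < cs.length := by omega
    rw [List.range_succ, List.foldl_append, ih (by omega)]
    simp only [List.foldl_cons, List.foldl_nil]
    have hcget : cs.getD m ' ' = cs[m] := List.getD_eq_getElem cs ' ' hmlt
    have hcmem : cs[m] ∈ cs := List.getElem_mem hmlt
    have hdrop : cs.drop m = cs[m] :: cs.drop (m + 1) := List.drop_eq_getElem_cons hmlt
    have htak : cs.take (m + 1) = cs.take m ++ [cs[m]] := by
      rw [List.take_add_one, List.getElem?_eq_getElem hmlt]; rfl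
    -- component 1: the left set
    have hleft : PySem.Set.add (PySem.Set.ofList (cs.take m)) (cs.getD m ' ')
        = PySem.Set.ofList (cs.take (m + 1)) := by
      rw [hcget, htak, PySem.Set.ofList_append_singleton]
    -- the stored count of cs[m]
    have hkeys : (pvRight cs m).keys.Nodup := by
      unfold pvRight
      rw [PySem.Dict.keys_mk, List.map_map]
      simp only [Function.comp_def]
      simp
    have hmemit : (cs[m], (((cs.drop m).count cs[m] : Nat) : Int)) ∈ (pvRight cs m).items :=
      List.mem_map_of_mem ((PySem.Set.mem_ofList cs cs[m]).mpr hcmem)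
    have hget : (pvRight cs m).getD (cs.getD m ' ') 0 = (((cs.drop m).count cs[m] : Nat) : Int) := by
      rw [hcget]; exact PySem.Dict.getD_of_mem_items _ hmemit hkeys 0
    have hcount : ((cs.drop m).count cs[m] : Int) - 1 = ((cs.drop (m + 1)).count cs[m] : Int) := by
      rw [hdrop, List.count_cons]
      simp
    -- component 2: the dict
    have hcont : (pvRight cs m).contains (cs.getD m ' ') = true := by
      rw [hcget]
      unfold pvRight
      rw [PySem.Dict.contains_mk, List.any_map]
      refine List.any_eq_true.mpr ⟨cs[m], (PySem.Set.mem_ofList cs cs[m]).mpr hcmem, by simp⟩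
    have hright : (pvRight cs m).insert (cs.getD m ' ')
          ((pvRight cs m).getD (cs.getD m ' ') 0 - 1) = pvRight cs (m + 1) := by
      apply PySem.Dict.ext
      rw [PySem.Dict.items_insert_of_contains _ _ hcont, hget, hcget, hcount]
      show List.map _ (List.map _ (PySem.Set.ofList cs)) = List.map _ (PySem.Set.ofList cs)
      rw [List.map_map]
      refine List.map_congr_left (fun a _ => ?_)
      by_cases hac : a = cs[m]
      · subst hac; simp
      · simp only [Function.comp_apply]
        rw [show (((a, ((List.count a (List.drop m cs) : Nat) : Int)) : Char × Int).1 == cs[m]) = false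
              by simp [hac]]
        simp only [Bool.false_eq_true, if_false]
        rw [hdrop, List.count_cons, show (cs[m] == a) = false by simp [Ne.symm hac]]
        simp
    -- component 3: the distinct-remaining counter
    have hgetnew : ((pvRight cs m).insert (cs.getD m ' ')
          ((pvRight cs m).getD (cs.getD m ' ') 0 - 1)).getD (cs.getD m ' ') 0
        = ((cs.drop (m + 1)).count cs[m] : Int) := by
      rw [PySem.Dict.getD_insert_self, hget, hcount]
    have hDstep : pvDn (cs.drop m) = pvDn (cs.drop (m + 1)) + (if cs[m] ∈ cs.drop (m + 1) then 0 else 1) := by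
      rw [hdrop]; exact pvDn_cons _ _
    have hrd : (if ((pvRight cs m).insert (cs.getD m ' ')
            ((pvRight cs m).getD (cs.getD m ' ') 0 - 1)).getD (cs.getD m ' ') 0 = 0
          then pvDn (cs.drop m) - 1 else pvDn (cs.drop m)) = pvDn (cs.drop (m + 1)) := by
      rw [hgetnew, hDstep]
      by_cases hmem : cs[m] ∈ cs.drop (m + 1)
      · rw [if_neg, if_pos hmem]
        · ring
        · have : (cs.drop (m + 1)).count cs[m] ≠ 0 := by
            rw [Ne, List.count_eq_zero]; exact fun h => h hmem
          exact_mod_cast this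
      · rw [if_pos, if_neg hmem]
        · ring
        · exact_mod_cast List.count_eq_zero.mpr hmem
    -- component 4: the accumulator
    have hF : pvF cs (m + 1) = pvF cs m +
        (if pvDn (cs.take (m + 1)) = pvDn (cs.drop (m + 1)) then 1 else 0) := by
      unfold pvF
      rw [List.range_succ, List.foldl_append]
      simp
    rw [hF]
    simp only [hleft]
    rw [hrd]
    simp only [hright]
    rw [show (PySem.Set.ofList (cs.take (m + 1))).len = pvDn (cs.take (m + 1)) from rfl]

-- B computes pvF
theorem pvB_eq (s : String) : numSplits1_alt s = pvF s.toList (((s.toList.length : Int) - 1).toNat) := by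
  unfold numSplits1_alt
  set cs := s.toList with hcs
  dsimp only []
  have h0 : cs.foldl (fun (d : PySem.Dict Char Int) c => d.insert c (d.getD c 0 + 1)) PySem.Dict.empty
      = pvRight cs 0 := by
    rw [PySem.Dict.foldl_insert_getD_add_one_eq_counter]
    apply PySem.Dict.ext
    rw [PySem.Dict.items_counter]
    rfl
  have h1 : ((PySem.Dict.size (pvRight cs 0)) : Int) = pvDn cs := by
    unfold pvRight pvDn
    simp [PySem.Dict.size]
  rw [h0, h1]
  rw [PySem.List.pyRange_one, List.foldl_map]
  simp only [Int.sub_zero, zero_add, PySem.List.pyGetD_natCast]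
  have hM : ((cs.length : Int) - 1).toNat ≤ cs.length - 1 := by omega
  rw [pvMainB cs _ hM]

-- ===== VERDICT =====
theorem numSplits1_spec : Claim_equal_numSplits1 := by
  unfold Claim_equal_numSplits1
  intro s _
  unfold Spec_numSplits1
  rw [pvA_eq, pvB_eq]
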